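-- pv_equiv track=rewrite | github.com/ldelnidoher/eop_pcc | functions_no_internet.py | leap_inv
-- ===== SOURCE A (Python) =====
-- import copy
--
-- def leap_inv(x, epoch,leaps,s):
--     p = copy.deepcopy(x)
--     p[0]+=s
--     for j in range(1,len(x)):
--         if epoch[j-1] in leaps:
--             s+=1
--         p[j]+=s
--     return p
-- ===== SOURCE B (Python) =====
-- def leap_inv(x, epoch, leaps, s):
--     # Structural recursion: the head gets x[0] + s; the tail is the same problem
--     # on x[1:], epoch[1:] with s bumped by whether epoch[0] is a leap epoch.
--     if not x:
--         return []
--     if len(x) == 1: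
--         return [x[0] + s]
--     return [x[0] + s] + leap_inv(x[1:], epoch[1:], leaps, s + (epoch[0] in leaps))
-- ===== Notes on version B (the rewrite author's own statement) =====
-- stated objective: alternative
-- what changed: Replaces A's in-place accumulator loop over a deep copy with structural recursion on the list: emit x[0]+s, then recurse on the tails of x and epoch with s bumped by whether epoch[0] is a leap epoch.
import Mathlib
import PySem

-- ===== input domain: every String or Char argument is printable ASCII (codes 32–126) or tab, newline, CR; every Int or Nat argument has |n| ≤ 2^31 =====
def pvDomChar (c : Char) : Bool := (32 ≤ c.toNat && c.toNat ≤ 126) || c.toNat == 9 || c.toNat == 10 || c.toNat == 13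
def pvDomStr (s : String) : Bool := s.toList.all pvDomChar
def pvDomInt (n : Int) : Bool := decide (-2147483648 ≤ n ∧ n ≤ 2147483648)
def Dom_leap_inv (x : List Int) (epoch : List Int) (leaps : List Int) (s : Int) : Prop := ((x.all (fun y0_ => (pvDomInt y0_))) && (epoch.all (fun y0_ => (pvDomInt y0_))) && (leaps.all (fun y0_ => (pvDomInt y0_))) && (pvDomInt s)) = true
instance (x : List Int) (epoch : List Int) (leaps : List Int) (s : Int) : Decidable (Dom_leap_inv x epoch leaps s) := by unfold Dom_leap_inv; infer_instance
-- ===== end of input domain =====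

-- B replaces A's in-place accumulator loop over a deep copy with structural recursion
-- on the list (head + recurse on the tails with a bumped s); return-value equivalence only.

-- ===== PORT A =====
def leap_inv (x : List Int) (epoch : List Int) (leaps : List Int) (s : Int) : List Int :=
  -- p = deepcopy(x); p[0] += s   (out-of-range write/read cannot occur inside Pre_)
  let p := PySem.List.pySetD x 0 (PySem.List.pyGetD x 0 0 + s)
  let st := (PySem.List.pyRange 1 (x.length : Int) 1).foldl
    (fun (st : List Int × Int) j =>
      let s' := if leaps.contains (PySem.List.pyGetD epoch (j - 1) 0) then st.2 + 1 else st.2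
      (PySem.List.pySetD st.1 j (PySem.List.pyGetD st.1 j 0 + s'), s'))
    (p, s)
  st.1

-- ===== PORT B =====
def leap_inv_alt (x : List Int) (epoch : List Int) (leaps : List Int) (s : Int) : List Int :=
  match x with
  | [] => []
  | [a] => [a + s]
  | a :: b :: t =>
      -- epoch[1:] = epoch.drop 1; epoch[0] is in range inside Pre_ (len x ≥ 2 forces epoch ≠ [])
      (a + s) :: leap_inv_alt (b :: t) (epoch.drop 1) leaps
        (s + if leaps.contains (PySem.List.pyGetD epoch 0 0) then 1 else 0)

-- ===== PRECONDITION & SPEC =====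
-- Pre_ excludes exactly the inputs where A raises IndexError: empty x (p[0] write) and
-- epoch shorter than len(x)-1 (epoch[j-1] read).
def Pre_leap_inv (x : List Int) (epoch : List Int) (leaps : List Int) (s : Int) : Prop :=
  x ≠ [] ∧ x.length ≤ epoch.length + 1
instance (x : List Int) (epoch : List Int) (leaps : List Int) (s : Int) : Decidable (Pre_leap_inv x epoch leaps s) := by unfold Pre_leap_inv; infer_instance
def pvWitness_leap_inv : List Int × List Int × List Int × Int := ([1, 2, 3], [10, 20], [20], 5)

def Spec_leap_inv (x : List Int) (epoch : List Int) (leaps : List Int) (s : Int) (out : List Int) : Prop := out = leap_inv_alt x epoch leaps s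
instance (x : List Int) (epoch : List Int) (leaps : List Int) (s : Int) (out : List Int) : Decidable (Spec_leap_inv x epoch leaps s out) := by unfold Spec_leap_inv; infer_instance

-- ===== CLAIM (what is proved, stated in full; the proofs are below) =====
def Claim_equal_leap_inv : Prop := ∀ (x : List Int) (epoch : List Int) (leaps : List Int) (s : Int), Dom_leap_inv x epoch leaps s → Pre_leap_inv x epoch leaps s → Spec_leap_inv x epoch leaps s (leap_inv x epoch leaps s)

-- ===== LEMMAS AND PROOFS =====

-- cumulative count of leap epochs among the first k entries of epoch
def pvC (epoch leaps : List Int) (k : Nat) : Int :=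
  ((epoch.take k).countP (fun e => leaps.contains e) : Int)

theorem pvC_zero (epoch leaps : List Int) : pvC epoch leaps 0 = 0 := rfl

theorem pvC_succ (epoch leaps : List Int) (k : Nat) (hk : k < epoch.length) :
    pvC epoch leaps (k + 1) =
      pvC epoch leaps k + (if leaps.contains (epoch.getD k 0) then 1 else 0) := by
  unfold pvC
  have ht : epoch.take (k + 1) = epoch.take k ++ [epoch[k]] := by
    rw [List.take_add_one]
    simp [List.getElem?_eq_getElem hk]
  have hd : epoch.getD k 0 = epoch[k] := by
    rw [List.getD_eq_getElem?_getD, List.getElem?_eq_getElem hk]; rfl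
  rw [ht, List.countP_append, hd]
  by_cases h : epoch[k] ∈ leaps <;> simp [h]

theorem pvC_cons (e : Int) (es leaps : List Int) (i : Nat) :
    pvC (e :: es) leaps (i + 1) =
      (if leaps.contains e then 1 else 0) + pvC es leaps i := by
  unfold pvC
  simp only [List.take_succ_cons, List.countP_cons]
  by_cases h : e ∈ leaps <;> simp [h] <;> push_cast <;> ring

theorem pvA_inv (x epoch leaps : List Int) (s : Int) (m : Nat)
    (h1 : 1 ≤ m) (h2 : m ≤ x.length) (h3 : m ≤ epoch.length + 1) :
    (PySem.List.pyRange 1 (m : Int) 1).foldl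
      (fun (st : List Int × Int) j =>
        let s' := if leaps.contains (PySem.List.pyGetD epoch (j - 1) 0) then st.2 + 1 else st.2
        (PySem.List.pySetD st.1 j (PySem.List.pyGetD st.1 j 0 + s'), s'))
      (PySem.List.pySetD x 0 (PySem.List.pyGetD x 0 0 + s), s)
    = ((List.range m).map (fun i => x.getD i 0 + s + pvC epoch leaps i) ++ x.drop m,
       s + pvC epoch leaps (m - 1)) := by
  induction m with
  | zero => omega
  | succ m ih =>
    rcases Nat.eq_or_lt_of_le h1 with h | h
    · have hm : m = 0 := by omega
      subst hm
      rcases x with _ | ⟨a, t⟩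
      · simp at h2
      · simp [PySem.List.pyRange_one_eq_nil, pvC_zero, List.range_succ,
          PySem.List.pySetD_of_nonneg]
    · have hm1 : 1 ≤ m := by omega
      have hmlt : m < x.length := by omega
      have hstep : PySem.List.pyRange 1 ((m : Int) + 1) 1
          = PySem.List.pyRange 1 (m : Int) 1 ++ [(m : Int)] := by
        exact PySem.List.pyRange_one_succ_right (a := 1) (b := (m : Int))
          (by exact_mod_cast hm1)
      have hcast : ((m + 1 : Nat) : Int) = (m : Int) + 1 := by push_cast; ring
      have hcond : PySem.List.pyGetD epoch ((m : Int) - 1) 0 = epoch.getD (m - 1) 0 := by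
        have h' : (m : Int) - 1 = ((m - 1 : Nat) : Int) := by omega
        rw [h', PySem.List.pyGetD_natCast]
      have hC : (if leaps.contains (epoch.getD (m - 1) 0)
          then s + pvC epoch leaps (m - 1) + 1 else s + pvC epoch leaps (m - 1))
          = s + pvC epoch leaps m := by
        have hc := pvC_succ epoch leaps (m - 1) (by omega)
        have hm' : m - 1 + 1 = m := by omega
        rw [hm'] at hc
        rw [hc]; split_ifs <;> ring
      rw [hcast, hstep, List.foldl_append, ih hm1 (by omega) (by omega)]
      simp only [List.foldl_cons, List.foldl_nil]
      rw [hcond, hC]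
      set P := (List.range m).map (fun i => x.getD i 0 + s + pvC epoch leaps i) with hP
      have hPlen : P.length = m := by simp [hP]
      have hget : PySem.List.pyGetD (P ++ x.drop m) (m : Int) 0 = x.getD m 0 := by
        rw [PySem.List.pyGetD_natCast]
        rw [List.getD_eq_getElem?_getD, List.getD_eq_getElem?_getD,
          List.getElem?_append_right (by omega), List.getElem?_drop]
        congr 2
        omega
      have hdrop : x.drop m = x.getD m 0 :: x.drop (m + 1) := by
        rw [List.getD_eq_getElem?_getD, List.getElem?_eq_getElem hmlt, Option.getD_some]
        exact List.drop_eq_getElem_cons hmlt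
      have hset : PySem.List.pySetD (P ++ x.drop m) (m : Int)
            (x.getD m 0 + (s + pvC epoch leaps m))
          = (List.range (m + 1)).map (fun i => x.getD i 0 + s + pvC epoch leaps i)
            ++ x.drop (m + 1) := by
        rw [PySem.List.pySetD_natCast]
        rw [List.set_append_right _ _ (by omega)]
        rw [hPlen, Nat.sub_self, hdrop, List.set_cons_zero, List.range_succ,
          List.map_append, hP]
        simp [add_assoc]
      rw [hget, hset]
      simp

-- closed form of B: the i-th output is x[i] + s + (leap count among epoch[0..i-1])
theorem pvB_closed (x : List Int) (epoch leaps : List Int) (s : Int)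
    (hne : x ≠ []) (hlen : x.length ≤ epoch.length + 1) :
    leap_inv_alt x epoch leaps s
      = (List.range x.length).map (fun i => x.getD i 0 + s + pvC epoch leaps i) := by
  induction x generalizing epoch s with
  | nil => exact absurd rfl hne
  | cons a t ih =>
    cases t with
    | nil => simp [leap_inv_alt, pvC_zero, List.range_succ]
    | cons b t2 =>
      cases epoch with
      | nil => simp at hlen
      | cons e es =>
        have hrec := ih es (s + if leaps.contains e then 1 else 0)
          (by simp) (by simpa using hlen)
        show (a + s) :: leap_inv_alt (b :: t2) es leaps
            (s + if leaps.contains (PySem.List.pyGetD (e :: es) 0 0) then 1 else 0)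
          = _
        have hget : PySem.List.pyGetD (e :: es) 0 0 = e := by
          simp [PySem.List.pyGetD, PySem.List.pyGet?, PySem.List.pyIdx?]
        rw [hget, hrec]
        rw [show (a :: b :: t2).length = (b :: t2).length + 1 from rfl,
          List.range_succ_eq_map, List.map_cons, List.map_map]
        congr 1
        · simp [pvC_zero]
        · apply List.map_congr_left
          intro i _
          simp only [Function.comp_apply, List.getD_cons_succ, pvC_cons]
          ring

-- ===== VERDICT (by name: the statement is the Claim_ definition above) =====
theorem leap_inv_spec : Claim_equal_leap_inv := by
  intro x epoch leaps s _ hpre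
  obtain ⟨hne, hlen⟩ := hpre
  have hx : 1 ≤ x.length := by
    cases x with
    | nil => exact absurd rfl hne
    | cons a t => simp
  unfold Spec_leap_inv leap_inv
  dsimp only
  rw [pvA_inv x epoch leaps s x.length hx le_rfl hlen,
    pvB_closed x epoch leaps s hne hlen]
  simp
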